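-- pv_equiv track=rewrite | github.com/dnakamuraz/prepDyn | src/prepDyn_auxiliary.py | compute_summary_after
-- ===== SOURCE A (Python) =====
-- def compute_summary_after(alignment):
--     num_seqs = len(alignment)
--
--     # Transpose to columns
--     columns = list(zip(*alignment.values()))
--
--     # Count columns that contain pound signs
--     total_pound = sum('#' in col for col in columns)
--
--     # Alignment length excluding columns of only pound signs
--     aln_length = len(columns)
--
--
--     # Count nucleotide and gap characters
--     total_nt = sum(c in "ACGTacgt" for seq in alignment.values() for c in seq)
--     total_gaps = sum(seq.count("-") for seq in alignment.values())
--     total_ns = sum(c in "Nn" for seq in alignment.values() for c in seq)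
--     total_qm = sum(seq.count("?") for seq in alignment.values())  # <- includes everything now
--
--     # Count additional missing data as gap-only blocks between #
--     missing_by_partition = 0
--     for seq in alignment.values():
--         parts = seq.split("#")
--         for part in parts:
--             if all(c == '-' for c in part):
--                 missing_by_partition += len(part)
--
--     total_missing = total_qm + missing_by_partition
--
--     return {
--         "num_seqs": num_seqs,
--         "aln_length": aln_length,
--         "total_nt": total_nt,
--         "total_gaps": total_gaps,
--         "total_ns": total_ns,
--         "total_qm": total_qm,
--         "total_pound": total_pound,
--         "missing_by_partition": missing_by_partition,
--         "total_missing": total_missing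
--     }
-- ===== SOURCE B (Python) =====
-- def compute_summary_after(alignment):
--     vals = list(alignment.values())
--     num_seqs = len(alignment)
--
--     # zip truncates to the shortest sequence, so the alignment length is the min
--     m = min((len(s) for s in vals), default=0)
--
--     # One row-major pass: simple counters + the set of pound columns (index < m)
--     total_nt = total_gaps = total_ns = total_qm = 0
--     pound_cols = set()
--     for seq in vals:
--         for i, c in enumerate(seq):
--             if c in "ACGTacgt":
--                 total_nt += 1
--             if c == '-':
--                 total_gaps += 1
--             if c in "Nn":
--                 total_ns += 1
--             if c == '?':
--                 total_qm += 1
--             if c == '#' and i < m: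
--                 pound_cols.add(i)
--
--     # gap-only blocks between '#'
--     missing_by_partition = 0
--     for seq in vals:
--         for part in seq.split("#"):
--             if all(c == '-' for c in part):
--                 missing_by_partition += len(part)
--
--     return {
--         "num_seqs": num_seqs,
--         "aln_length": m,
--         "total_nt": total_nt,
--         "total_gaps": total_gaps,
--         "total_ns": total_ns,
--         "total_qm": total_qm,
--         "total_pound": len(pound_cols),
--         "missing_by_partition": missing_by_partition,
--         "total_missing": total_qm + missing_by_partition,
--     }
-- ===== Notes on version B (the rewrite author's own statement) =====
-- stated objective: simpler
-- what changed: B replaces the zip-transpose into column tuples and the six separate full traversals by one row-major pass per sequence with plain counters and a set of pound-column indices bounded by the precomputed minimum length; the split('#') gap-only-block scan is kept.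
import Mathlib
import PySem

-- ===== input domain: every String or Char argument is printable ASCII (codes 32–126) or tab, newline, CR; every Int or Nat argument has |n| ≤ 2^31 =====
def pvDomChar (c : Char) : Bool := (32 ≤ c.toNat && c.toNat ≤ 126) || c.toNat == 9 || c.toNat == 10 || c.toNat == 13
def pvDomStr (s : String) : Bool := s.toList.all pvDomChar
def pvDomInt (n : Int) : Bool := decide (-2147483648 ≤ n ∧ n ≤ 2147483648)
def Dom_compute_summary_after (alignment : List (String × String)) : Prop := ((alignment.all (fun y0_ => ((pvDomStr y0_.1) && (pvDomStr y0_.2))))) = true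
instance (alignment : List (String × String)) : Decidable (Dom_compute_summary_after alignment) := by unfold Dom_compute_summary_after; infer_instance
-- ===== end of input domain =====

-- B replaces the zip-transpose and six separate full traversals by one row-major pass per
-- sequence with plain counters and a set of pound-column indices (objective: simpler).

-- ===== PORT A =====
-- min length of the value strings: zip(*vals) truncates to the shortest sequence (0 if empty)
def pvMinLen (vals : List (List Char)) : Nat :=
  match vals with
  | [] => 0
  | s :: rest => rest.foldl (fun a t => min a t.length) s.length

-- the missing_by_partition loop, identical in A and in B (same Python code in both)
def pvMissing (vals : List (List Char)) : Int :=
  vals.foldl (fun acc s =>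
    (s.splitOn '#').foldl
      (fun a part => if part.all (fun c => c == '-') then a + (part.length : Int) else a) acc) 0

def compute_summary_after (alignment : List (String × String)) : List (String × Int) :=
  let vals := alignment.map (fun p => p.2.toList)
  let num_seqs : Int := alignment.length
  -- columns = list(zip(*alignment.values())): column i is [s[i] for s in vals], i below the min length
  -- (getD is exact here: every index used is < pvMinLen vals ≤ each length)
  let columns := (List.range (pvMinLen vals)).map (fun i => vals.map (fun s => s.getD i ' '))
  let total_pound : Int := (columns.map (fun col => if col.contains '#' then (1 : Int) else 0)).sum
  let aln_length : Int := columns.length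
  let total_nt : Int := (vals.flatMap (fun s => s.map (fun c => if c ∈ "ACGTacgt".toList then (1 : Int) else 0))).sum
  -- str.count of a single-character needle is the character count (exact)
  let total_gaps : Int := (vals.map (fun s => (s.count '-' : Int))).sum
  let total_ns : Int := (vals.flatMap (fun s => s.map (fun c => if c ∈ "Nn".toList then (1 : Int) else 0))).sum
  let total_qm : Int := (vals.map (fun s => (s.count '?' : Int))).sum
  let missing_by_partition := pvMissing vals
  let total_missing := total_qm + missing_by_partition
  [("num_seqs", num_seqs), ("aln_length", aln_length), ("total_nt", total_nt),
   ("total_gaps", total_gaps), ("total_ns", total_ns), ("total_qm", total_qm),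
   ("total_pound", total_pound), ("missing_by_partition", missing_by_partition),
   ("total_missing", total_missing)]

-- ===== PORT B =====
-- one loop body: four independent counters plus the set of pound-column indices below m
def pvRowStep (m : Int) (st : Int × Int × Int × Int × PySem.Set Int) (ic : Int × Char) :
    Int × Int × Int × Int × PySem.Set Int :=
  match st, ic with
  | (nt, g, ns, qm, ps), (i, c) =>
    (if c ∈ "ACGTacgt".toList then nt + 1 else nt,
     if c = '-' then g + 1 else g,
     if c ∈ "Nn".toList then ns + 1 else ns,
     if c = '?' then qm + 1 else qm,
     if c = '#' ∧ i < m then PySem.Set.add ps i else ps)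

def compute_summary_after_alt (alignment : List (String × String)) : List (String × Int) :=
  let vals := alignment.map (fun p => p.2.toList)
  let num_seqs : Int := alignment.length
  let m : Int := (pvMinLen vals : Int)
  let st := vals.foldl (fun st s => (PySem.List.enumerate s 0).foldl (pvRowStep m) st)
      ((0 : Int), (0 : Int), (0 : Int), (0 : Int), ([] : PySem.Set Int))
  match st with
  | (total_nt, total_gaps, total_ns, total_qm, pound_cols) =>
    let missing_by_partition := pvMissing vals
    [("num_seqs", num_seqs), ("aln_length", m), ("total_nt", total_nt),
     ("total_gaps", total_gaps), ("total_ns", total_ns), ("total_qm", total_qm),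
     ("total_pound", (pound_cols.length : Int)), ("missing_by_partition", missing_by_partition),
     ("total_missing", total_qm + missing_by_partition)]

-- ===== PRECONDITION & SPEC =====
def Spec_compute_summary_after (alignment : List (String × String)) (out : List (String × Int)) : Prop := out = compute_summary_after_alt alignment
instance (alignment : List (String × String)) (out : List (String × Int)) : Decidable (Spec_compute_summary_after alignment out) := by unfold Spec_compute_summary_after; infer_instance

-- ===== CLAIM (what is proved, stated in full; the proofs are below) =====
def Claim_equal_compute_summary_after : Prop := ∀ (alignment : List (String × String)), Dom_compute_summary_after alignment → Spec_compute_summary_after alignment (compute_summary_after alignment)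

-- ===== LEMMAS AND PROOFS =====

-- the pound-set component of the per-row fold, in isolation
def pvRowPs (m : Int) (ps : PySem.Set Int) (s : List Char) (k : Int) : PySem.Set Int :=
  (PySem.List.enumerate s k).foldl
    (fun ps ic => if ic.2 = '#' ∧ ic.1 < m then PySem.Set.add ps ic.1 else ps) ps

theorem pvMinLen_le {vals : List (List Char)} {s : List Char} (h : s ∈ vals) :
    pvMinLen vals ≤ s.length := by
  match vals, h with
  | a :: rest, h =>
    have hfold : rest.foldl (fun a t => min a t.length) a.length
        = (rest.map List.length).foldl min a.length := by
      rw [List.foldl_map]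
    rcases List.mem_cons.mp h with rfl | hmem
    · simpa [pvMinLen, hfold] using (PySem.List.foldl_min_le (rest.map List.length) s.length).1
    · simpa [pvMinLen, hfold] using
        (PySem.List.foldl_min_le (rest.map List.length) a.length).2 s.length
          (List.mem_map_of_mem hmem)

theorem pvRow_eq (m : Int) (s : List Char) :
    ∀ (k : Int) (nt g ns qm : Int) (ps : PySem.Set Int),
    (PySem.List.enumerate s k).foldl (pvRowStep m) (nt, g, ns, qm, ps) =
      (nt + (s.map (fun c => if c ∈ "ACGTacgt".toList then (1 : Int) else 0)).sum,
       g + (s.count '-' : Int),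
       ns + (s.map (fun c => if c ∈ "Nn".toList then (1 : Int) else 0)).sum,
       qm + (s.count '?' : Int),
       pvRowPs m ps s k) := by
  induction s with
  | nil => intro k nt g ns qm ps; simp [PySem.List.enumerate_nil, pvRowPs]
  | cons c rest ih =>
    intro k nt g ns qm ps
    rw [PySem.List.enumerate_cons]
    simp only [List.foldl_cons, pvRowStep, ih]
    refine Prod.ext ?_ (Prod.ext ?_ (Prod.ext ?_ (Prod.ext ?_ ?_))) <;>
      simp [List.count_cons, pvRowPs, PySem.List.enumerate_cons] <;>
      split_ifs <;> simp_all <;> ring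

theorem pvOuter_eq (m : Int) (vals : List (List Char)) :
    ∀ (nt g ns qm : Int) (ps : PySem.Set Int),
    vals.foldl (fun st s => (PySem.List.enumerate s 0).foldl (pvRowStep m) st) (nt, g, ns, qm, ps) =
      (nt + (vals.map (fun s => (s.map (fun c => if c ∈ "ACGTacgt".toList then (1 : Int) else 0)).sum)).sum,
       g + (vals.map (fun s => (s.count '-' : Int))).sum,
       ns + (vals.map (fun s => (s.map (fun c => if c ∈ "Nn".toList then (1 : Int) else 0)).sum)).sum,
       qm + (vals.map (fun s => (s.count '?' : Int))).sum,
       vals.foldl (fun ps s => pvRowPs m ps s 0) ps) := by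
  induction vals with
  | nil => intro nt g ns qm ps; simp
  | cons s rest ih =>
    intro nt g ns qm ps
    simp only [List.foldl_cons, pvRow_eq, ih, List.map_cons, List.sum_cons]
    refine Prod.ext ?_ (Prod.ext ?_ (Prod.ext ?_ (Prod.ext ?_ rfl))) <;> simp <;> ring

theorem pvSumFlat (vals : List (List Char)) (f : Char → Int) :
    (vals.flatMap (fun s => s.map f)).sum = (vals.map (fun s => (s.map f).sum)).sum := by
  induction vals with
  | nil => simp
  | cons s rest ih => simp [List.flatMap_cons, List.sum_append, ih]

theorem pvMemRowPs (m : Int) (s : List Char) :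
    ∀ (k : Int) (ps : PySem.Set Int) (j : Int),
    j ∈ pvRowPs m ps s k ↔
      j ∈ ps ∨ ∃ l : Nat, l < s.length ∧ j = k + l ∧ s.getD l ' ' = '#' ∧ j < m := by
  induction s with
  | nil => intro k ps j; simp [pvRowPs, PySem.List.enumerate_nil]
  | cons c rest ih =>
    intro k ps j
    have hstep : pvRowPs m ps (c :: rest) k
        = pvRowPs m (if c = '#' ∧ k < m then PySem.Set.add ps k else ps) rest (k + 1) := by
      simp [pvRowPs, PySem.List.enumerate_cons]
    rw [hstep, ih]
    constructor
    · rintro (hmem | ⟨l, hl, rfl, hc, hm⟩)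
      · split_ifs at hmem with hif
        · rcases (PySem.Set.mem_add _ _ _).mp hmem with h | rfl
          · exact Or.inl h
          · exact Or.inr ⟨0, by simp, by simp, by simp [hif.1], hif.2⟩
        · exact Or.inl hmem
      · exact Or.inr ⟨l + 1, by simp only [List.length_cons]; omega, by push_cast; ring, by simpa using hc, hm⟩
    · rintro (hmem | ⟨l, hl, rfl, hc, hm⟩)
      · left; split_ifs
        · exact (PySem.Set.mem_add _ _ _).mpr (Or.inl hmem)
        · exact hmem
      · cases l with
        | zero =>
          simp only [List.getD_cons_zero] at hc
          left
          have : (c = '#' ∧ k < m) := ⟨hc, by simpa using hm⟩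
          rw [if_pos this]
          exact (PySem.Set.mem_add _ _ _).mpr (Or.inr (by simp))
        | succ l' =>
          right
          exact ⟨l', by simp only [List.length_cons] at hl; omega, by push_cast; ring, by simpa using hc, by simpa using hm⟩

theorem pvNodupRowPs (m : Int) (s : List Char) :
    ∀ (k : Int) (ps : PySem.Set Int), ps.Nodup → (pvRowPs m ps s k).Nodup := by
  induction s with
  | nil => intro k ps h; simpa [pvRowPs, PySem.List.enumerate_nil] using h
  | cons c rest ih =>
    intro k ps h
    have hstep : pvRowPs m ps (c :: rest) k
        = pvRowPs m (if c = '#' ∧ k < m then PySem.Set.add ps k else ps) rest (k + 1) := by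
      simp [pvRowPs, PySem.List.enumerate_cons]
    rw [hstep]
    apply ih
    split_ifs
    · exact PySem.Set.nodup_add _ _ h
    · exact h

theorem pvMemOuterPs (m : Int) (vals : List (List Char)) :
    ∀ (ps : PySem.Set Int) (j : Int),
    j ∈ vals.foldl (fun ps s => pvRowPs m ps s 0) ps ↔
      j ∈ ps ∨ ∃ s ∈ vals, ∃ l : Nat, l < s.length ∧ j = (l : Int) ∧ s.getD l ' ' = '#' ∧ j < m := by
  induction vals with
  | nil => intro ps j; simp
  | cons s rest ih =>
    intro ps j
    simp only [List.foldl_cons, ih, pvMemRowPs, List.mem_cons]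
    constructor
    · rintro ((h | ⟨l, hl, hj, hc, hm⟩) | ⟨t, ht, hrest⟩)
      · exact Or.inl h
      · exact Or.inr ⟨s, Or.inl rfl, l, hl, by simpa using hj, hc, hm⟩
      · exact Or.inr ⟨t, Or.inr ht, hrest⟩
    · rintro (h | ⟨t, (rfl | ht), hrest⟩)
      · exact Or.inl (Or.inl h)
      · obtain ⟨l, hl, hj, hc, hm⟩ := hrest
        exact Or.inl (Or.inr ⟨l, hl, by simpa using hj, hc, hm⟩)
      · exact Or.inr ⟨t, ht, hrest⟩

theorem pvNodupOuterPs (m : Int) (vals : List (List Char)) :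
    ∀ (ps : PySem.Set Int), ps.Nodup → (vals.foldl (fun ps s => pvRowPs m ps s 0) ps).Nodup := by
  induction vals with
  | nil => intro ps h; simpa using h
  | cons s rest ih =>
    intro ps h
    simpa using ih _ (pvNodupRowPs m s 0 ps h)

-- A's column count of '#'-containing columns equals the size of B's pound-column index set
theorem pvPound_eq (vals : List (List Char)) :
    (((List.range (pvMinLen vals)).map (fun i => vals.map (fun s => s.getD i ' '))).map
      (fun col => if col.contains '#' then (1 : Int) else 0)).sum =
    ((vals.foldl (fun ps s => pvRowPs (pvMinLen vals : Int) ps s 0) []).length : Int) := by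
  classical
  set m := pvMinLen vals with hm
  set p : Nat → Bool := fun i => (vals.map (fun s => s.getD i ' ')).contains '#' with hp
  set T := vals.foldl (fun ps s => pvRowPs (m : Int) ps s 0) ([] : PySem.Set Int) with hT
  set L := ((List.range m).filter p).map Int.ofNat with hL
  have hnodupL : L.Nodup :=
    ((List.nodup_range).filter p).map (fun a b h => Int.ofNat.inj h)
  have hnodupT : T.Nodup := pvNodupOuterPs (m : Int) vals [] (List.nodup_nil)
  have hmemL : ∀ j : Int, j ∈ L ↔ ∃ n : Nat, n < m ∧ p n = true ∧ j = (n : Int) := by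
    intro j
    simp only [hL, List.mem_map, List.mem_filter, List.mem_range]
    constructor
    · rintro ⟨n, ⟨hn, hpn⟩, rfl⟩
      exact ⟨n, hn, hpn, rfl⟩
    · rintro ⟨n, hn, hpn, rfl⟩
      exact ⟨n, ⟨hn, hpn⟩, rfl⟩
  have hcontains : ∀ i : Nat, p i = true ↔ ∃ s ∈ vals, s.getD i ' ' = '#' := by
    intro i
    simp only [hp, List.contains_iff_mem, List.mem_map]
  have hmemT : ∀ j : Int, j ∈ T ↔ ∃ n : Nat, n < m ∧ p n = true ∧ j = (n : Int) := by
    intro j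
    rw [hT, pvMemOuterPs]
    simp only [List.not_mem_nil, false_or]
    constructor
    · rintro ⟨s, hs, l, hl, rfl, hc, hlt⟩
      exact ⟨l, by exact_mod_cast hlt, (hcontains l).mpr ⟨s, hs, hc⟩, rfl⟩
    · rintro ⟨n, hn, hpn, rfl⟩
      obtain ⟨s, hs, hc⟩ := (hcontains n).mp hpn
      have hns : n < s.length := lt_of_lt_of_le hn (pvMinLen_le hs)
      exact ⟨s, hs, n, hns, rfl, hc, by exact_mod_cast hn⟩
  have hperm : L.Perm T := by
    rw [List.perm_ext_iff_of_nodup hnodupL hnodupT]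
    intro j; rw [hmemL, hmemT]
  have hlen : T.length = ((List.range m).filter p).length := by
    rw [← hperm.length_eq, hL, List.length_map]
  rw [List.map_map]
  have hcomp : ((fun col => if col.contains '#' then (1 : Int) else 0) ∘
      fun i => vals.map (fun s => s.getD i ' ')) = fun i => if p i then (1 : Int) else 0 := rfl
  rw [hcomp]
  have hsum : ∀ l : List Nat,
      (l.map (fun i => if p i then (1 : Int) else 0)).sum = ((l.filter p).length : Int) := by
    intro l
    induction l with
    | nil => simp
    | cons a t iht =>
      by_cases h : p a = true
      · simp [h, iht]; ring
      · simp [h, iht]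
  rw [hsum, hlen]

theorem compute_summary_after_spec : Claim_equal_compute_summary_after := by
  intro alignment _
  unfold Spec_compute_summary_after
  simp only [compute_summary_after, compute_summary_after_alt]
  rw [pvOuter_eq]
  simp only [zero_add, List.length_map, List.length_range]
  rw [pvSumFlat, pvSumFlat, pvPound_eq]
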